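-- pv_equiv track=rewrite | github.com/sebi06/czi_playground | czitools/pylibczirw_metadata_old.py | get_dimorder
-- ===== SOURCE A (Python) =====
-- from typing import List, Dict, Tuple, Optional, Type, Any, Union
--
-- def get_dimorder(dimstring: str) -> Tuple[Dict, List, int]:
--     """Get the order of dimensions from dimension string
--
--     :param dimstring: string containing the dimensions
--     :type dimstring: str
--     :return: dims_dict - dictionary with the dimensions and its positions
--     :rtype: dict
--     :return: dimindex_list - list with indices of dimensions
--     :rtype: list
--     :return: numvalid_dims - number of valid dimensions
--     :rtype: integer
--     """
--
--     dimindex_list = []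
--     dims = ["R", "I", "M", "H", "V", "B", "S", "T", "C", "Z", "Y", "X", "A"]
--     dims_dict = {}
--
--     # loop over all dimensions and find the index
--     for d in dims:
--         dims_dict[d] = dimstring.find(d)
--         dimindex_list.append(dimstring.find(d))
--
--     # check if a dimension really exists
--     numvalid_dims = sum(i > 0 for i in dimindex_list)
--
--     return dims_dict, dimindex_list, numvalid_dims
-- ===== SOURCE B (Python) =====
-- def get_dimorder(dimstring: str):
--     # Single pass over dimstring: fill a fixed slot table (first occurrence only)
--     # and count valid dims (first index > 0) on the fly; no per-dimension scans.
--     dims = ["R", "I", "M", "H", "V", "B", "S", "T", "C", "Z", "Y", "X", "A"]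
--     idx = [-1] * len(dims)
--     numvalid_dims = 0
--     for i, ch in enumerate(dimstring):
--         try:
--             j = dims.index(ch)
--         except ValueError:
--             continue
--         if idx[j] == -1:
--             idx[j] = i
--             if i > 0:
--                 numvalid_dims += 1
--     dims_dict = dict(zip(dims, idx))
--     return dims_dict, idx, numvalid_dims
-- ===== Notes on version B (the rewrite author's own statement) =====
-- stated objective: alternative
-- what changed: Instead of scanning the string once per dimension (13 str.find calls plus a final indicator sum), B makes a single pass over dimstring, filling a fixed 13-slot table at the first occurrence of each dimension letter and incrementing the valid-dims counter on the fly.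
import Mathlib
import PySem

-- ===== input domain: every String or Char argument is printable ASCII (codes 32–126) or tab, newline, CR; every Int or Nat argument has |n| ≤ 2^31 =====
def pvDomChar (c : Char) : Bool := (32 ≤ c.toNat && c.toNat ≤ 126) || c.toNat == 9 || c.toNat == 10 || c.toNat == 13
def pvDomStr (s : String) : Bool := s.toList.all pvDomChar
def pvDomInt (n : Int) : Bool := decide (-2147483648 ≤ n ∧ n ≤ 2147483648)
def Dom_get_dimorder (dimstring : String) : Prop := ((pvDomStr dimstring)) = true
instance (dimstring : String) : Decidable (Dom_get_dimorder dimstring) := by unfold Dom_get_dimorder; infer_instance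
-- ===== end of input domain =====

-- B replaces A's 13 per-dimension string scans by ONE pass over dimstring (fixed
-- slot table filled at first occurrence, valid-dims counter updated on the fly);
-- objective: alternative (same asymptotic cost, different traversal).

-- ===== PORT A =====
def get_dimorder (dimstring : String) : (List (String × Int)) × List Int × Int :=
  let dims : List String := ["R", "I", "M", "H", "V", "B", "S", "T", "C", "Z", "Y", "X", "A"]
  -- for d in dims: dims_dict[d] = dimstring.find(d); dimindex_list.append(dimstring.find(d))
  let st := dims.foldl
    (fun (acc : PySem.Dict String Int × List Int) d =>
      (acc.1.insert d (PySem.Str.find dimstring d), acc.2 ++ [PySem.Str.find dimstring d]))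
    (PySem.Dict.empty, [])
  -- numvalid_dims = sum(i > 0 for i in dimindex_list)
  (st.1.items, st.2, (st.2.map (fun i => if 0 < i then (1 : Int) else 0)).sum)

-- ===== PORT B =====
-- Python's 1-character strings (characters of dimstring) are ported as Char.
def pvDimsB : List Char := ['R', 'I', 'M', 'H', 'V', 'B', 'S', 'T', 'C', 'Z', 'Y', 'X', 'A']

-- loop body: j = dims.index(ch) (continue if absent); if idx[j] == -1: set it, bump counter if i > 0
-- (j is always < 13 here, so Python's idx[j] is in range; getD is exact)
def pvStep (st : List Int × Int) (p : Int × Char) : List Int × Int :=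
  match PySem.List.index? pvDimsB p.2 with
  | none => st
  | some j =>
      if st.1.getD j 0 = -1 then
        (st.1.set j p.1, if 0 < p.1 then st.2 + 1 else st.2)
      else st

def get_dimorder_alt (dimstring : String) : (List (String × Int)) × List Int × Int :=
  -- idx = [-1]*13; numvalid = 0; for i, ch in enumerate(dimstring): …
  let st := (PySem.List.enumerate dimstring.toList).foldl pvStep (List.replicate 13 (-1), 0)
  -- dims_dict = dict(zip(dims, idx))
  let dims_dict := ((pvDimsB.map (fun c => String.singleton c)).zip st.1).foldl
    (fun (d : PySem.Dict String Int) p => d.insert p.1 p.2) PySem.Dict.empty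
  (dims_dict.items, st.1, st.2)

-- ===== PRECONDITION & SPEC =====
def Spec_get_dimorder (dimstring : String) (out : (List (String × Int)) × List Int × Int) : Prop := out = get_dimorder_alt dimstring
instance (dimstring : String) (out : (List (String × Int)) × List Int × Int) : Decidable (Spec_get_dimorder dimstring out) := by unfold Spec_get_dimorder; infer_instance

-- ===== CLAIM (what is proved, stated in full; the proofs are below) =====
def Claim_equal_get_dimorder : Prop := ∀ (dimstring : String), Dom_get_dimorder dimstring → Spec_get_dimorder dimstring (get_dimorder dimstring)

-- ===== LEMMAS AND PROOFS =====

-- first index of a character, -1 if absent (proof-side characterisation shared by both ports)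
def pvFirstIdx : List Char → Char → Int
  | [], _ => -1
  | x :: xs, c =>
      if x = c then 0
      else if pvFirstIdx xs c = -1 then -1 else pvFirstIdx xs c + 1

theorem pvFirstIdx_ge (cs : List Char) (c : Char) : -1 ≤ pvFirstIdx cs c := by
  induction cs with
  | nil => simp [pvFirstIdx]
  | cons x xs ih => simp only [pvFirstIdx]; split_ifs <;> omega

theorem pvFirstIdx_eq_neg_one_iff (cs : List Char) (c : Char) :
    pvFirstIdx cs c = -1 ↔ c ∉ cs := by
  induction cs with
  | nil => simp [pvFirstIdx]
  | cons x xs ih =>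
    have hge := pvFirstIdx_ge xs c
    simp only [pvFirstIdx, List.mem_cons]
    split_ifs with h1 h2
    · constructor
      · intro h; exact absurd h (by norm_num)
      · intro h; exact absurd (Or.inl h1.symm) h
    · constructor
      · intro _
        rintro (e | m)
        · exact h1 e.symm
        · exact (ih.mp h2) m
      · intro _; rfl
    · constructor
      · intro h; omega
      · intro h
        exact absurd (ih.mpr fun m => h (Or.inr m)) h2

theorem pvFirstIdx_hit (cs : List Char) (c : Char) (h : c ∈ cs) :
    cs[(pvFirstIdx cs c).toNat]? = some c := by
  induction cs with
  | nil => simp at h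
  | cons x xs ih =>
    simp only [pvFirstIdx]
    split_ifs with h1 h2
    · simp [h1]
    · have hm : c ∈ xs := by
        rcases List.mem_cons.mp h with e | m
        · exact absurd e.symm h1
        · exact m
      exact absurd hm ((pvFirstIdx_eq_neg_one_iff xs c).mp h2)
    · have hm : c ∈ xs := by
        rcases List.mem_cons.mp h with e | m
        · exact absurd e.symm h1
        · exact m
      have hge := pvFirstIdx_ge xs c
      have hne := (pvFirstIdx_eq_neg_one_iff xs c).not.mpr (by simpa using hm)
      have h0 : 0 ≤ pvFirstIdx xs c := by omega
      have : (pvFirstIdx xs c + 1).toNat = (pvFirstIdx xs c).toNat + 1 := by omega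
      rw [this]
      simpa using ih hm

theorem pvFirstIdx_min (cs : List Char) (c : Char) :
    ∀ i < (pvFirstIdx cs c).toNat, cs[i]? ≠ some c := by
  induction cs with
  | nil => simp [pvFirstIdx]
  | cons x xs ih =>
    intro i hi
    simp only [pvFirstIdx] at hi
    split_ifs at hi with h1 h2
    · omega
    · omega
    · have hge := pvFirstIdx_ge xs c
      have h0 : 0 ≤ pvFirstIdx xs c := by omega
      have hi' : (pvFirstIdx xs c + 1).toNat = (pvFirstIdx xs c).toNat + 1 := by omega
      rw [hi'] at hi
      match i with
      | 0 => simpa using fun e => h1 e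
      | Nat.succ j =>
        have : j < (pvFirstIdx xs c).toNat := by omega
        simpa using ih j this

-- [c] is a prefix of l.drop i exactly when l[i]? = some c
theorem singleton_prefix_drop (l : List Char) (c : Char) (i : Nat) :
    [c] <+: l.drop i ↔ l[i]? = some c := by
  rw [← List.head?_drop]
  cases h : l.drop i with
  | nil => simp
  | cons a t => simp [List.cons_prefix_cons, eq_comm]

-- PySem's find on a single-character needle computes pvFirstIdx
theorem find_single (cs : List Char) (c : Char) :
    PySem.Chars.find cs [c] = pvFirstIdx cs c := by
  by_cases hm : c ∈ cs
  · obtain ⟨s, t, rfl⟩ := List.append_of_mem hm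
    set l := s ++ c :: t with hl
    have hinf : [c] <:+: l := ⟨s, t, by simp [hl]⟩
    have h0 : 0 ≤ PySem.Chars.find l [c] := (PySem.Chars.find_nonneg_iff l [c]).mpr hinf
    obtain ⟨hpre, hmin⟩ := PySem.Chars.find_spec h0
    have hn : l[(PySem.Chars.find l [c]).toNat]? = some c := (singleton_prefix_drop _ _ _).mp hpre
    have hmem : c ∈ l := hm
    have hfi0 : 0 ≤ pvFirstIdx l c := by
      have := pvFirstIdx_ge l c
      have := (pvFirstIdx_eq_neg_one_iff l c).not.mpr (by simpa using hmem)
      omega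
    have hm2 : l[(pvFirstIdx l c).toNat]? = some c := pvFirstIdx_hit l c hmem
    have heq : (PySem.Chars.find l [c]).toNat = (pvFirstIdx l c).toNat := by
      rcases lt_trichotomy (PySem.Chars.find l [c]).toNat (pvFirstIdx l c).toNat with hlt | he | hgt
      · exact absurd hn (pvFirstIdx_min l c _ hlt)
      · exact he
      · exact absurd ((singleton_prefix_drop _ _ _).mpr hm2) (hmin _ hgt)
    omega
  · have hni : ¬ [c] <:+: cs := fun hinf => hm (hinf.subset (by simp))
    rw [(PySem.Chars.find_eq_neg_one_iff cs [c]).mpr hni, (pvFirstIdx_eq_neg_one_iff cs c).mpr hm]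

-- the shifted first-occurrence value B's slot j converges to
def pvShift (cs : List Char) (k : Int) (j : Nat) : Int :=
  if pvFirstIdx cs (pvDimsB.getD j ' ') = -1 then -1
  else k + pvFirstIdx cs (pvDimsB.getD j ' ')

theorem pvShift_cons_ne (x : Char) (xs : List Char) (k : Int) (j : Nat)
    (h : pvDimsB.getD j ' ' ≠ x) : pvShift (x :: xs) k j = pvShift xs (k + 1) j := by
  have hx : x ≠ pvDimsB.getD j ' ' := fun e => h e.symm
  simp only [pvShift, pvFirstIdx, if_neg hx]
  have := pvFirstIdx_ge xs (pvDimsB.getD j ' ')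
  split_ifs <;> omega

theorem pvShift_cons_eq (x : Char) (xs : List Char) (k : Int) (j : Nat)
    (h : pvDimsB.getD j ' ' = x) : pvShift (x :: xs) k j = k := by
  simp only [pvShift, pvFirstIdx, if_pos h.symm]
  norm_num

-- joint invariant of B's single pass
theorem set_getD_ne (l : List Int) (i j : Nat) (hne : i ≠ j) (a : Int) :
    (l.set i a).getD j 0 = l.getD j 0 := by
  simp [List.getD_eq_getElem?_getD, List.getElem?_set_ne hne]

theorem set_getD_self (l : List Int) (i : Nat) (h : i < l.length) (a : Int) :
    (l.set i a).getD i 0 = a := by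
  simp [List.getD_eq_getElem?_getD, h]

theorem lsum_finset (f : Nat → Int) : ((List.range 13).map f).sum = ∑ j ∈ Finset.range 13, f j := rfl

theorem pvScan_inv (cs : List Char) : ∀ (k : Int) (idx : List Int) (n : Int),
    0 ≤ k → idx.length = 13 →
    (((PySem.List.enumerate cs k).foldl pvStep (idx, n)).1.length = 13)
    ∧ (∀ j, j < 13 →
        ((PySem.List.enumerate cs k).foldl pvStep (idx, n)).1.getD j 0
          = if idx.getD j 0 = -1 then pvShift cs k j else idx.getD j 0)
    ∧ ((PySem.List.enumerate cs k).foldl pvStep (idx, n)).2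
          = n + ((List.range 13).map
              (fun j => if idx.getD j 0 = -1 ∧ 0 < pvShift cs k j then (1 : Int) else 0)).sum := by
  induction cs with
  | nil =>
    intro k idx n hk hlen
    refine ⟨by simpa [PySem.List.enumerate_nil] using hlen, ?_, ?_⟩
    · intro j hj
      simp only [PySem.List.enumerate_nil, List.foldl_nil, pvShift, pvFirstIdx]
      split_ifs with h
      · exact h
      · rfl
    · simp [PySem.List.enumerate_nil, pvShift, pvFirstIdx]
  | cons x xs ih =>
    intro k idx n hk hlen
    rw [PySem.List.enumerate_cons, List.foldl_cons]
    cases hix : PySem.List.index? pvDimsB x with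
    | none =>
      have hstep : pvStep (idx, n) (k, x) = (idx, n) := by
        simp only [pvStep, hix]
      rw [hstep]
      have hxmem : x ∉ pvDimsB := (PySem.List.index?_eq_none_iff _ _).mp hix
      have hne : ∀ j, j < 13 → pvDimsB.getD j ' ' ≠ x := by
        intro j hj e
        apply hxmem
        have hj' : j < pvDimsB.length := by simpa [pvDimsB] using hj
        rw [← e, List.getD_eq_getElem _ _ hj']
        exact List.getElem_mem _
      obtain ⟨L, S, C⟩ := ih (k + 1) idx n (by omega) hlen
      refine ⟨L, ?_, ?_⟩
      · intro j hj
        rw [S j hj]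
        by_cases h : idx.getD j 0 = -1
        · rw [if_pos h, if_pos h, pvShift_cons_ne x xs k j (hne j hj)]
        · rw [if_neg h, if_neg h]
      · rw [C]
        congr 2
        apply List.map_eq_map_iff.mpr
        intro j hj
        rw [pvShift_cons_ne x xs k j (hne j (List.mem_range.mp hj))]
    | some i =>
      obtain ⟨hi', hxi, -⟩ := PySem.List.getElem_of_index?_eq_some hix
      have hi13 : i < 13 := by simpa [pvDimsB] using hi'
      have hgd : pvDimsB.getD i ' ' = x := by rw [List.getD_eq_getElem _ _ hi']; exact hxi
      have hnd : pvDimsB.Nodup := by decide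
      have hne : ∀ j, j < 13 → j ≠ i → pvDimsB.getD j ' ' ≠ x := by
        intro j hj hji e
        apply hji
        have hj' : j < pvDimsB.length := by simpa [pvDimsB] using hj
        have heq : pvDimsB[j] = pvDimsB[i] := by
          rw [← List.getD_eq_getElem _ ' ' hj', e, ← hxi]
          rfl
        exact (List.Nodup.getElem_inj_iff hnd).mp heq
      by_cases hslot : idx.getD i 0 = -1
      · have hstep : pvStep (idx, n) (k, x) = (idx.set i k, if 0 < k then n + 1 else n) := by
          simp only [pvStep, hix]
          rw [if_pos hslot]
        rw [hstep]
        obtain ⟨L, S, C⟩ := ih (k + 1) (idx.set i k) (if 0 < k then n + 1 else n) (by omega)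
          (by simpa using hlen)
        refine ⟨L, ?_, ?_⟩
        · intro j hj
          rw [S j hj]
          by_cases hji : j = i
          · subst hji
            rw [set_getD_self idx j (by rw [hlen]; exact hj) k,
                if_neg (show ¬ (k = -1) by omega), if_pos hslot,
                pvShift_cons_eq x xs k j hgd]
          · rw [set_getD_ne idx i j (fun e => hji e.symm) k]
            by_cases h : idx.getD j 0 = -1
            · rw [if_pos h, if_pos h, pvShift_cons_ne x xs k j (hne j hj hji)]
            · rw [if_neg h, if_neg h]
        · rw [C, lsum_finset, lsum_finset]
          have hmem : i ∈ Finset.range 13 := Finset.mem_range.mpr hi13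
          rw [← Finset.add_sum_erase _ _ hmem, ← Finset.add_sum_erase _ _ hmem]
          have hcong : ∀ j ∈ (Finset.range 13).erase i,
              (if (idx.set i k).getD j 0 = -1 ∧ 0 < pvShift xs (k + 1) j then (1 : Int) else 0)
              = (if idx.getD j 0 = -1 ∧ 0 < pvShift (x :: xs) k j then (1 : Int) else 0) := by
            intro j hj
            obtain ⟨hji, hjr⟩ := Finset.mem_erase.mp hj
            have hj13 := Finset.mem_range.mp hjr
            rw [set_getD_ne idx i j (fun e => hji e.symm) k,
                pvShift_cons_ne x xs k j (hne j hj13 hji)]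
          rw [Finset.sum_congr rfl hcong]
          have hfi : (if (idx.set i k).getD i 0 = -1 ∧ 0 < pvShift xs (k + 1) i then (1 : Int) else 0) = 0 := by
            rw [set_getD_self idx i (by rw [hlen]; exact hi13) k]
            exact if_neg (fun h => absurd h.1 (by omega))
          have hgi : (if idx.getD i 0 = -1 ∧ 0 < pvShift (x :: xs) k i then (1 : Int) else 0)
              = (if 0 < k then 1 else 0) := by
            rw [pvShift_cons_eq x xs k i hgd]
            exact if_congr (by rw [hslot]; simp) rfl rfl
          rw [hfi, hgi]
          split_ifs <;> ring
      · have hstep : pvStep (idx, n) (k, x) = (idx, n) := by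
          simp only [pvStep, hix]
          rw [if_neg hslot]
        rw [hstep]
        obtain ⟨L, S, C⟩ := ih (k + 1) idx n (by omega) hlen
        refine ⟨L, ?_, ?_⟩
        · intro j hj
          rw [S j hj]
          by_cases hji : j = i
          · subst hji
            rw [if_neg hslot, if_neg hslot]
          · by_cases h : idx.getD j 0 = -1
            · rw [if_pos h, if_pos h, pvShift_cons_ne x xs k j (hne j hj hji)]
            · rw [if_neg h, if_neg h]
        · rw [C]
          congr 2
          apply List.map_eq_map_iff.mpr
          intro j hjr
          by_cases hji : j = i
          · subst hji
            rw [if_neg (fun h => hslot h.1), if_neg (fun h => hslot h.1)]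
          · rw [pvShift_cons_ne x xs k j (hne j (List.mem_range.mp hjr) hji)]

-- final characterisation of B's pass
theorem pvScan_eq (cs : List Char) :
    (PySem.List.enumerate cs 0).foldl pvStep (List.replicate 13 (-1), 0)
    = (pvDimsB.map (fun d => PySem.Chars.find cs [d]),
       ((pvDimsB.map (fun d => PySem.Chars.find cs [d])).map
          (fun i => if 0 < i then (1 : Int) else 0)).sum) := by
  obtain ⟨L, S, C⟩ := pvScan_inv cs 0 (List.replicate 13 (-1)) 0 le_rfl (by simp)
  have hsh : ∀ j : Nat, pvShift cs 0 j = PySem.Chars.find cs [pvDimsB.getD j ' '] := by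
    intro j
    rw [find_single]
    simp only [pvShift]
    split_ifs with h <;> omega
  apply Prod.ext_iff.mpr
  constructor
  · apply List.ext_getElem
    · rw [L]; simp [pvDimsB]
    · intro j h1 h2
      have hj13 : j < 13 := by rw [L] at h1; exact h1
      have hS := S j hj13
      rw [List.getD_eq_getElem _ 0 h1, List.getD_replicate _ hj13, if_pos rfl, hsh j] at hS
      rw [hS, List.getElem_map]
      congr 1
      rw [List.getD_eq_getElem _ ' ' (by simpa [pvDimsB] using hj13)]
  · rw [C, zero_add]
    have hfun : ∀ j ∈ List.range 13,
        (if (List.replicate 13 (-1 : Int)).getD j 0 = -1 ∧ 0 < pvShift cs 0 j then (1 : Int) else 0)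
        = (fun j => if 0 < PySem.Chars.find cs [pvDimsB.getD j ' '] then (1 : Int) else 0) j := by
      intro j hjr
      rw [List.getD_replicate _ (List.mem_range.mp hjr), hsh j]
      simp
    rw [List.map_eq_map_iff.mpr hfun]
    rfl

-- ===== VERDICT (by name: the statement is the Claim_ definition above) =====
theorem get_dimorder_spec : Claim_equal_get_dimorder := by
  intro dimstring _
  unfold Spec_get_dimorder
  simp only [get_dimorder, get_dimorder_alt, pvScan_eq, pvDimsB, List.map_cons, List.map_nil,
    List.zip_cons_cons, List.zip_nil_right, List.foldl_cons, List.foldl_nil, List.sum_cons,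
    List.sum_nil]
  rfl
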